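-- pv_equiv track=rewrite | github.com/DaniloCarneiroNeri/prototype-solution | backend/main.py | extract_street_base
-- ===== SOURCE A (Python) =====
-- def extract_street_base(addr: str) -> str:
--     """Remove Quadra, Lote e pontuação para comparar nomes de rua."""
--     if not addr: return ""
--     up = str(addr).upper()
--     # Corta antes de indicativos de quadra/lote ou vírgulas
--     cut = len(up)
--     for token in [" Q", " QUADRA", " QD", " LT", " LOTE", ",", " - "]:
--         pos = up.find(token)
--         if pos != -1:
--             cut = min(cut, pos)
--     return addr[:cut].strip()
-- ===== SOURCE B (Python) =====
-- _MARKERS = (" Q", " QUADRA", " QD", " LT", " LOTE", ",", " - ")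
--
-- def extract_street_base(addr: str) -> str:
--     """Remove Quadra, Lote e pontuação para comparar nomes de rua."""
--     if not addr: return ""
--     up = str(addr).upper()
--     cut = len(up)
--     for i in range(len(up)):
--         if up.startswith(_MARKERS, i):
--             cut = i
--             break
--     return addr[:cut].strip()
-- ===== Notes on version B (the rewrite author's own statement) =====
-- stated objective: alternative
-- what changed: Inverts the loop structure: instead of seven independent str.find passes (one per marker) combined with a tracked minimum, B makes one left-to-right scan over positions and at each index tests whether any marker begins there (startswith with a tuple), breaking at the first hit.
import Mathlib
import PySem

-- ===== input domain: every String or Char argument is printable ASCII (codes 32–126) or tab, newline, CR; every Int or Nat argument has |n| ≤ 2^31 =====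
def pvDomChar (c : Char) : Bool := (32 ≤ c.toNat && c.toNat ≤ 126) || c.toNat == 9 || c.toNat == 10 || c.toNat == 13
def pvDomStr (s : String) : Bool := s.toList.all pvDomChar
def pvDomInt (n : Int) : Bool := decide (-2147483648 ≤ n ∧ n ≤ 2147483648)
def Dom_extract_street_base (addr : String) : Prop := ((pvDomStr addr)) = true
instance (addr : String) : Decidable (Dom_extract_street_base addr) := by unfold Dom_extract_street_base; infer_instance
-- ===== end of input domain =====

-- B inverts A's loop structure: instead of seven independent full `find` passes (one per
-- marker) with a tracked minimum, B makes one left-to-right scan over positions, testing at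
-- each index whether any marker begins there, and stops at the first hit (objective: alternative).

-- ===== PORT A =====
def extract_street_base (addr : String) : String :=
  if addr = "" then ""
  else
    let up := PySem.Str.upper addr
    let cut : Int := PySem.Str.len up
    let cut := [" Q", " QUADRA", " QD", " LT", " LOTE", ",", " - "].foldl
      (fun cut token =>
        let pos := PySem.Str.find up token
        if pos ≠ -1 then min cut pos else cut) cut
    PySem.Str.strip (PySem.Str.slice addr none (some cut))

-- ===== PORT B =====
-- the marker tuple _MARKERS
def ebTokens : List (List Char) :=
  [" Q".toList, " QUADRA".toList, " QD".toList, " LT".toList, " LOTE".toList,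
   ",".toList, " - ".toList]

-- Source B's positional loop: walk the character list left to right keeping the current index k;
-- `up.startswith(_MARKERS, i)` is the any-isPrefixOf test on the tail at index k; `break`
-- returns k, falling off the end returns len(up).
def ebScan (k : Nat) : List Char → Nat
  | [] => k
  | c :: rest =>
      if ebTokens.any (fun t => t.isPrefixOf (c :: rest)) then k
      else ebScan (k + 1) rest

def extract_street_base_alt (addr : String) : String :=
  if addr = "" then ""
  else
    let up := PySem.Str.upper addr
    let cut := ebScan 0 up.toList
    PySem.Str.strip (String.ofList (addr.toList.take cut))

-- ===== PRECONDITION & SPEC =====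
def Spec_extract_street_base (addr : String) (out : String) : Prop := out = extract_street_base_alt addr
instance (addr : String) (out : String) : Decidable (Spec_extract_street_base addr out) := by unfold Spec_extract_street_base; infer_instance

-- ===== CLAIM (what is proved, stated in full; the proofs are below) =====
def Claim_equal_extract_street_base : Prop := ∀ (addr : String), Dom_extract_street_base addr → Spec_extract_street_base addr (extract_street_base addr)

-- ===== LEMMAS AND PROOFS =====

-- A's folding step, generic over the searched text u
def ebStep (u : List Char) (cut : Int) (t : List Char) : Int :=
  if PySem.Chars.find u t ≠ -1 then min cut (PySem.Chars.find u t) else cut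

theorem ebFold_le (u : List Char) : ∀ (ts : List (List Char)) (c : Int),
    ts.foldl (ebStep u) c ≤ c := by
  intro ts
  induction ts with
  | nil => intro c; simp
  | cons t ts ih =>
    intro c
    have h := ih (ebStep u c t)
    have : ebStep u c t ≤ c := by unfold ebStep; split_ifs <;> simp
    simpa [List.foldl] using le_trans h this

theorem ebFold_le_find (u : List Char) : ∀ (ts : List (List Char)) (c : Int) (t : List Char),
    t ∈ ts → PySem.Chars.find u t ≠ -1 → ts.foldl (ebStep u) c ≤ PySem.Chars.find u t := by
  intro ts
  induction ts with
  | nil => intro c t h; simp at h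
  | cons t' ts ih =>
    intro c t hmem hfind
    rcases List.mem_cons.mp hmem with h | h
    · subst h
      have h1 : ebStep u c t ≤ PySem.Chars.find u t := by
        simp [ebStep, hfind]
      simpa [List.foldl] using le_trans (ebFold_le u ts _) h1
    · simpa [List.foldl] using ih _ t h hfind

theorem ebFold_cases (u : List Char) : ∀ (ts : List (List Char)) (c : Int),
    ts.foldl (ebStep u) c = c ∨
    ∃ t ∈ ts, PySem.Chars.find u t ≠ -1 ∧ ts.foldl (ebStep u) c = PySem.Chars.find u t := by
  intro ts
  induction ts with
  | nil => intro c; left; rfl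
  | cons t' ts ih =>
    intro c
    rcases ih (ebStep u c t') with h | ⟨t, hmem, hf, heq⟩
    · by_cases hf : PySem.Chars.find u t' ≠ -1
      · rcases min_choice c (PySem.Chars.find u t') with hm | hm
        · left; simpa [List.foldl, ebStep, hf, hm] using h
        · right; exact ⟨t', List.mem_cons_self, hf, by simpa [List.foldl, ebStep, hf, hm] using h⟩
      · left; simpa [List.foldl, ebStep, hf] using h
    · right; exact ⟨t, List.mem_cons_of_mem _ hmem, hf, by simpa [List.foldl] using heq⟩

-- B-side scan lemmas
theorem ebScan_ge : ∀ (l : List Char) (k : Nat), k ≤ ebScan k l := by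
  intro l
  induction l with
  | nil => intro k; simp [ebScan]
  | cons c rest ih =>
    intro k
    unfold ebScan; split_ifs
    · exact le_refl k
    · exact le_trans (Nat.le_succ k) (ih (k + 1))

theorem ebScan_le : ∀ (l : List Char) (k : Nat), ebScan k l ≤ k + l.length := by
  intro l
  induction l with
  | nil => intro k; simp [ebScan]
  | cons c rest ih =>
    intro k
    unfold ebScan; split_ifs
    · simp
    · have := ih (k + 1); simpa [Nat.add_comm, Nat.add_left_comm] using this

theorem ebScan_match : ∀ (l : List Char) (k : Nat), ebScan k l < k + l.length →
    ebTokens.any (fun t => t.isPrefixOf (l.drop (ebScan k l - k))) = true := by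
  intro l
  induction l with
  | nil => intro k h; simp [ebScan] at h
  | cons c rest ih =>
    intro k h
    by_cases hm : ebTokens.any (fun t => t.isPrefixOf (c :: rest)) = true
    · simp [ebScan, hm]
    · have hscan : ebScan k (c :: rest) = ebScan (k + 1) rest := by
        simp [ebScan, hm]
      rw [hscan] at h ⊢
      have hge : k + 1 ≤ ebScan (k + 1) rest := ebScan_ge rest (k + 1)
      have hlt : ebScan (k + 1) rest < (k + 1) + rest.length := by
        simp at h; omega
      have := ih (k + 1) hlt
      have hd : (c :: rest).drop (ebScan (k + 1) rest - k)
          = rest.drop (ebScan (k + 1) rest - (k + 1)) := by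
        have : ebScan (k + 1) rest - k = (ebScan (k + 1) rest - (k + 1)) + 1 := by omega
        simp [this]
      rw [hd]; exact this

theorem ebScan_min : ∀ (l : List Char) (k j : Nat), k ≤ j → j < ebScan k l →
    ebTokens.any (fun t => t.isPrefixOf (l.drop (j - k))) = false := by
  intro l
  induction l with
  | nil => intro k j h1 h2; simp [ebScan] at h2; omega
  | cons c rest ih =>
    intro k j h1 h2
    by_cases hm : ebTokens.any (fun t => t.isPrefixOf (c :: rest)) = true
    · simp [ebScan, hm] at h2; omega
    · have hscan : ebScan k (c :: rest) = ebScan (k + 1) rest := by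
        simp [ebScan, hm]
      rw [hscan] at h2
      by_cases hj : j = k
      · subst hj; simpa using eq_false_of_ne_true hm
      · have h1' : k + 1 ≤ j := by omega
        have := ih (k + 1) j h1' h2
        have hd : (c :: rest).drop (j - k) = rest.drop (j - (k + 1)) := by
          have : j - k = (j - (k + 1)) + 1 := by omega
          simp [this]
        rw [hd]; exact this

-- any-prefix ↔ existence of a matching token
theorem ebAny_iff (l : List Char) :
    ebTokens.any (fun t => t.isPrefixOf l) = true ↔ ∃ t ∈ ebTokens, t <+: l := by
  simp [List.any_eq_true, List.isPrefixOf_iff_prefix]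

-- the central identity: A's min-of-finds cut equals B's leftmost-scan cut
theorem cut_eq (u : List Char) :
    (ebTokens.foldl (ebStep u) (u.length : Int)).toNat = ebScan 0 u := by
  set c := ebTokens.foldl (ebStep u) (u.length : Int) with hc
  set r := ebScan 0 u with hr
  have hcle : c ≤ (u.length : Int) := ebFold_le u ebTokens _
  have hc0 : 0 ≤ c := by
    rcases ebFold_cases u ebTokens (u.length : Int) with h | ⟨t, _, hf, heq⟩
    · have hl : (0:Int) ≤ (u.length : Int) := by positivity
      omega
    · have := PySem.Chars.neg_one_le_find u t; omega
  have hrle : r ≤ u.length := by simpa using ebScan_le u 0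
  -- minimality on the A side: below c.toNat no token matches
  have hAmin : ∀ j < c.toNat, ∀ t ∈ ebTokens, ¬ t <+: u.drop j := by
    intro j hj t hmem hpre
    have hinf : t <:+: u := hpre.isInfix.trans (List.drop_suffix j u).isInfix
    have hf : PySem.Chars.find u t ≠ -1 := (PySem.Chars.find_ne_neg_one_iff u t).mpr hinf
    have hle : c ≤ PySem.Chars.find u t := ebFold_le_find u ebTokens _ t hmem hf
    have hpos : 0 ≤ PySem.Chars.find u t := by
      have := PySem.Chars.neg_one_le_find u t; omega
    have hspec := (PySem.Chars.find_spec (s := u) (sub := t) hpos).2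
    have hjge : (PySem.Chars.find u t).toNat ≤ j := by
      by_contra hlt
      exact hspec j (by omega) hpre
    omega
  -- c.toNat ≤ r
  have h1 : c.toNat ≤ r := by
    by_contra h
    have hrlt : r < c.toNat := by omega
    have hrltlen : r < u.length := by omega
    have hmatch := ebScan_match u 0 (by simpa using hrltlen)
    simp only [Nat.sub_zero] at hmatch
    rcases (ebAny_iff _).mp hmatch with ⟨t, hmem, hpre⟩
    exact hAmin r hrlt t hmem hpre
  -- r ≤ c.toNat
  have h2 : r ≤ c.toNat := by
    by_contra h
    have hclt : c.toNat < r := by omega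
    have hnomatch := ebScan_min u 0 c.toNat (Nat.zero_le _) hclt
    simp only [Nat.sub_zero] at hnomatch
    rcases ebFold_cases u ebTokens (u.length : Int) with heq | ⟨t, hmem, hf, heq⟩
    · have : c.toNat = u.length := by omega
      omega
    · have hpos : 0 ≤ PySem.Chars.find u t := by
        have := PySem.Chars.neg_one_le_find u t; omega
      have hpre := (PySem.Chars.find_spec (s := u) (sub := t) hpos).1
      have hcf : c = PySem.Chars.find u t := by omega
      have : t <+: u.drop c.toNat := by rw [hcf]; exact hpre
      have := (ebAny_iff (u.drop c.toNat)).mpr ⟨t, hmem, this⟩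
      rw [hnomatch] at this; exact Bool.noConfusion this
  omega

-- ===== VERDICT (by name: the statement is the Claim_ definition above) =====
theorem extract_street_base_spec : Claim_equal_extract_street_base := by
  intro addr _
  unfold Spec_extract_street_base
  by_cases h : addr = ""
  · simp [extract_street_base, extract_street_base_alt, h]
  · simp only [extract_street_base, extract_street_base_alt]
    rw [if_neg h, if_neg h]
    set u := (PySem.Str.upper addr).toList with hu
    have hfold : [" Q", " QUADRA", " QD", " LT", " LOTE", ",", " - "].foldl
        (fun cut token =>
          let pos := PySem.Str.find (PySem.Str.upper addr) token
          if pos ≠ -1 then min cut pos else cut) (PySem.Str.len (PySem.Str.upper addr))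
        = ebTokens.foldl (ebStep u) (u.length : Int) := by
      simp [List.foldl, ebTokens, ebStep, PySem.Str.find_eq, PySem.Str.len, hu]
    rw [hfold]
    set c := ebTokens.foldl (ebStep u) (u.length : Int) with hc
    have hc0 : 0 ≤ c := by
      rcases ebFold_cases u ebTokens (u.length : Int) with h' | ⟨t, _, hf, heq⟩
      · have hl : (0:Int) ≤ (u.length : Int) := by positivity
        omega
      · have := PySem.Chars.neg_one_le_find u t; omega
    have hl2 : PySem.Chars.slice addr.toList none (some c) = addr.toList.take (ebScan 0 u) := by
      rw [PySem.Chars.slice_eq_listSlice, PySem.List.slice_to addr.toList hc0, hc, cut_eq u]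
    have hslice : PySem.Str.slice addr none (some c)
        = String.ofList (addr.toList.take (ebScan 0 u)) := congrArg String.ofList hl2
    exact congrArg PySem.Str.strip hslice
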